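-- pv_equiv track=rewrite | github.com/anonymous0429/code20190420 | .ipynb_checkpoints/ProcessData-checkpoint.py | Wipe_off_Punctuation
-- ===== SOURCE A (Python) =====
-- def Wipe_off_Punctuation(str_list):
--     str_Wiped = []
--     #去掉title中的标点符号,并且全部转化为小写
--     Punctuation = [',', ':', '(', ')', '-', '_', ';', '.', '\'']
--     for i in range(len(str_list)):
--         temp = str_list[i]
--         for j in range(len(Punctuation)):
--             temp = temp.replace(Punctuation[j]," ").lower()
--         str_Wiped.append(temp)
--     return str_Wiped
-- ===== SOURCE B (Python) =====
-- PUNCT = {',', ':', '(', ')', '-', '_', ';', '.', "'"}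
--
-- def Wipe_off_Punctuation(str_list):
--     # single character-level pass per string, then one lowercase pass
--     return [''.join(' ' if c in PUNCT else c for c in s).lower() for s in str_list]
-- ===== Notes on version B (the rewrite author's own statement) =====
-- stated objective: idiomatic
-- what changed: Replaces nine whole-string replace-then-lower passes per string with a single character-level scan using a punctuation set, followed by one lower() call.
import Mathlib
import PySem

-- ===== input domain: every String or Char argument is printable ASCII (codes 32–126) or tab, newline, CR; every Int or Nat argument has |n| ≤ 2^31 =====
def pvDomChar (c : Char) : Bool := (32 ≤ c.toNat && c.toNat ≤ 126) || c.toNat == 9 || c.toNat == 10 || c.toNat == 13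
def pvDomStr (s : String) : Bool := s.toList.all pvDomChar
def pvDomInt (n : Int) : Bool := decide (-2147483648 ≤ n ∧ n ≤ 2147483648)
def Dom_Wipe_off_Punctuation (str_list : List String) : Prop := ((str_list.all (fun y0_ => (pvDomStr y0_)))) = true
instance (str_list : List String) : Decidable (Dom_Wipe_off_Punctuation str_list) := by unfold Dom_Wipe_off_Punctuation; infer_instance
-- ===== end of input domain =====

-- B replaces A's nine whole-string replace+lower passes per string by one
-- character-level scan over a punctuation set followed by a single lower().


-- ===== PORT A =====
def pvPunctuation : List String := [",", ":", "(", ")", "-", "_", ";", ".", "'"]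

def Wipe_off_Punctuation (str_list : List String) : List String :=
  (PySem.List.pyRange 0 (PySem.List.len str_list) 1).foldl
    (fun str_Wiped i =>
      let temp := PySem.List.pyGetD str_list i ""
      let temp := (PySem.List.pyRange 0 (PySem.List.len pvPunctuation) 1).foldl
        (fun t j => PySem.Str.lower (PySem.Str.replace t (PySem.List.pyGetD pvPunctuation j "") " ")) temp
      str_Wiped ++ [temp]) []

-- ===== PORT B =====
def pvPunctSet : PySem.Set Char := PySem.Set.ofList [',', ':', '(', ')', '-', '_', ';', '.', '\'']

def Wipe_off_Punctuation_alt (str_list : List String) : List String :=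
  str_list.map (fun s =>
    PySem.Str.lower (PySem.Str.join ""
      (s.toList.map (fun c => if c ∈ pvPunctSet then " " else String.ofList [c]))))

-- ===== PRECONDITION & SPEC =====
def Spec_Wipe_off_Punctuation (str_list : List String) (out : List String) : Prop := out = Wipe_off_Punctuation_alt str_list
instance (str_list : List String) (out : List String) : Decidable (Spec_Wipe_off_Punctuation str_list out) := by unfold Spec_Wipe_off_Punctuation; infer_instance

-- ===== CLAIM (what is proved, stated in full; the proofs are below) =====
def Claim_equal_Wipe_off_Punctuation : Prop := ∀ (str_list : List String), Dom_Wipe_off_Punctuation str_list → Spec_Wipe_off_Punctuation str_list (Wipe_off_Punctuation str_list)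

-- ===== LEMMAS AND PROOFS =====

-- per-character substitution performed by a single-character replace
def pvSub (p : Char) (c : Char) : Char := if c = p then ' ' else c

-- A's per-character effect: the nine lower∘sub steps composed in A's order
def pvCharA (c : Char) : Char :=
  PySem.Chars.lowerChar (pvSub '\''
    (PySem.Chars.lowerChar (pvSub '.'
      (PySem.Chars.lowerChar (pvSub ';'
        (PySem.Chars.lowerChar (pvSub '_'
          (PySem.Chars.lowerChar (pvSub '-'
            (PySem.Chars.lowerChar (pvSub ')'
              (PySem.Chars.lowerChar (pvSub '('
                (PySem.Chars.lowerChar (pvSub ':'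
                  (PySem.Chars.lowerChar (pvSub ',' c)))))))))))))))))

-- B's per-character effect
def pvCharB (c : Char) : Char :=
  PySem.Chars.lowerChar (if c ∈ pvPunctSet then ' ' else c)

lemma pv_go_single (p : Char) : ∀ (fuel : Nat) (l acc : List Char), l.length ≤ fuel →
    PySem.Chars.replace.go [p] [' '] fuel l acc = acc.reverse ++ l.map (pvSub p) := by
  intro fuel
  induction fuel with
  | zero =>
    intro l acc h
    have : l = [] := List.eq_nil_of_length_eq_zero (Nat.le_zero.mp h)
    subst this; simp [PySem.Chars.replace.go]
  | succ n ih =>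
    intro l acc h
    cases l with
    | nil => simp [PySem.Chars.replace.go]
    | cons c t =>
      simp only [List.length_cons] at h
      simp only [PySem.Chars.replace.go]
      by_cases hc : c = p
      · subst hc
        rw [show List.isPrefixOf [c] (c :: t) = true by simp [List.isPrefixOf]]
        rw [show List.drop ([c] : List Char).length (c :: t) = t from rfl]
        rw [ih t _ (by omega)]
        simp [pvSub]
      · rw [show List.isPrefixOf [p] (c :: t) = false by
          simp [List.isPrefixOf]; exact fun hh => absurd hh.symm hc]
        rw [ih t _ (by omega)]
        simp [pvSub, hc]

lemma pv_replace_single (p : Char) (cs : List Char) :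
    PySem.Chars.replace cs [p] [' '] = cs.map (pvSub p) := by
  rw [PySem.Chars.replace]
  simp only [List.isEmpty_cons, Bool.false_eq_true, if_false]
  exact pv_go_single p cs.length cs [] le_rfl

-- one step of A's inner loop, seen on the character list
lemma pv_stepA (t : String) (p : String) (pc : Char) (hp : p.toList = [pc]) :
    (PySem.Str.lower (PySem.Str.replace t p " ")).toList
      = t.toList.map (fun c => PySem.Chars.lowerChar (pvSub pc c)) := by
  rw [PySem.Str.toList_lower, PySem.Str.toList_replace, hp]
  rw [show (" " : String).toList = [' '] by decide]
  rw [pv_replace_single, PySem.Chars.lower, List.map_map]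
  rfl

-- A's and B's per-character effects agree on every domain character
set_option maxRecDepth 8192 in
set_option maxHeartbeats 1000000 in
lemma pv_char_eq (c : Char) (hc : pvDomChar c = true) : pvCharA c = pvCharB c := by
  have hlt : c.toNat < 127 := by
    simp only [pvDomChar, Bool.or_eq_true, Bool.and_eq_true, decide_eq_true_eq, beq_iff_eq] at hc
    omega
  have hall : ∀ n : Nat, n < 127 → pvCharA (Char.ofNat n) = pvCharB (Char.ofNat n) := by decide
  have := hall c.toNat hlt
  rwa [Char.ofNat_toNat] at this

-- B's per-string computation, seen per character
lemma pv_altB (s : String) :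
    (PySem.Str.lower (PySem.Str.join ""
        (s.toList.map (fun c => if c ∈ pvPunctSet then " " else String.ofList [c])))).toList
      = s.toList.map pvCharB := by
  rw [PySem.Str.toList_lower, PySem.Str.toList_join]
  have h : (s.toList.map (fun c => if c ∈ pvPunctSet then " " else String.ofList [c])).map String.toList
      = (s.toList.map (fun c => if c ∈ pvPunctSet then ' ' else c)).map (fun c => [c]) := by
    simp only [List.map_map]
    apply List.map_congr_left
    intro c _
    by_cases hm : c ∈ pvPunctSet <;> simp [hm]
  rw [h]
  rw [show ("" : String).toList = [] from rfl]
  rw [PySem.Chars.join_nil_singletons, PySem.Chars.lower, List.map_map]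
  rfl

-- A's whole inner loop on one string is a single per-character map
set_option maxHeartbeats 1000000 in
lemma pv_innerA (s : String) :
    (pvPunctuation.foldl
        (fun t p => PySem.Str.lower (PySem.Str.replace t p " ")) s).toList
      = s.toList.map pvCharA := by
  simp only [pvPunctuation, List.foldl_cons, List.foldl_nil]
  rw [pv_stepA _ "'" '\'' (by decide), pv_stepA _ "." '.' (by decide),
      pv_stepA _ ";" ';' (by decide), pv_stepA _ "_" '_' (by decide),
      pv_stepA _ "-" '-' (by decide), pv_stepA _ ")" ')' (by decide),
      pv_stepA _ "(" '(' (by decide), pv_stepA _ ":" ':' (by decide),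
      pv_stepA _ "," ',' (by decide)]
  simp only [List.map_map, Function.comp_def]
  rfl

theorem Wipe_off_Punctuation_spec : Claim_equal_Wipe_off_Punctuation := by
  intro str_list hdom
  unfold Spec_Wipe_off_Punctuation Wipe_off_Punctuation Wipe_off_Punctuation_alt
  rw [PySem.List.foldl_pyRange_zero_pyGetD str_list ""
    (fun str_Wiped temp => str_Wiped ++
      [(PySem.List.pyRange 0 (PySem.List.len pvPunctuation) 1).foldl
        (fun t j => PySem.Str.lower (PySem.Str.replace t (PySem.List.pyGetD pvPunctuation j "") " ")) temp]) []]
  rw [PySem.List.foldl_append_singleton_eq_map]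
  simp only [List.nil_append]
  apply List.map_congr_left
  intro s hs
  have hds : pvDomStr s = true := by
    unfold Dom_Wipe_off_Punctuation at hdom
    rw [List.all_eq_true] at hdom
    exact hdom s hs
  apply String.toList_inj.mp
  rw [PySem.List.foldl_pyRange_zero_pyGetD pvPunctuation ""
    (fun t p => PySem.Str.lower (PySem.Str.replace t p " ")) s]
  rw [pv_innerA, pv_altB]
  apply List.map_congr_left
  intro c hc
  exact pv_char_eq c (by
    rw [pvDomStr, List.all_eq_true] at hds
    exact hds c hc)
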